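-- pv_equiv track=rewrite | github.com/isossa/MATH4320 | Project 2/Algorithm/utils.py | get_violation_count
-- ===== SOURCE A (Python) =====
-- def get_str_weight(s: str, weights: list) -> int:
--     """
--     Given a solution string of length i, this function returns the weight of the solution.
--     i represents the number of items.
--
--     :param s: Binary string solution. If index i is 1, then item i is selected otherwise it is not selected
--     :param weights: Weights of all items
--     :return: Total weight of this binary string
--     """
--     return __get_str_attribute(s, weights)
--
-- def get_violation_count(s: str, weights: list, capacities: list) -> int:
--     """
--
--     :param s: A binary string solution
--     :param weights: Weights of all items in each knapsack, represented as a matrix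
--     :param capacities: Capacities of all knapsacks
--     :return:
--     """
--     if len(s) < 1:
--         return False
--
--     count_violations = 0
--
--     for j in range(0, len(weights)):
--         weight = get_str_weight(s, weights[j])
--         if weight > capacities[j]:
--             count_violations += 1
--
--     return count_violations
--
-- def __get_str_attribute(s: str, attribute: list):
--     """
--     Given a binary solution string of length i, this function return an attribute as specified by the content of the
--     ATTRIBUTE parameter
--
--     :param s:
--     :param attribute:
--     :return:
--     """
--     result = 0
--     for index, value in enumerate(s):
--         result += int(value) * attribute[index]
--     return result
-- ===== SOURCE B (Python) =====
-- def get_violation_count(s: str, weights: list, capacities: list) -> int: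
--     if len(s) < 1:
--         return False
--     if not weights:
--         return 0
--     totals = [0] * len(weights)
--     for index, value in enumerate(s):
--         v = int(value)
--         if v:
--             totals = [t + v * row[index] for t, row in zip(totals, weights)]
--     return sum(1 for t, c in zip(totals, capacities) if t > c)
-- ===== Notes on version B (the rewrite author's own statement) =====
-- stated objective: alternative
-- what changed: B inverts the loop nesting: one item-major pass over the string updates a per-knapsack partial-sum list (with an early return when there are no knapsacks and skipping zero bits) instead of recomputing each knapsack's dot product independently; the violation count is then a single zip-comparison pass.
-- outside the precondition, e.g. on get_violation_count('', [], []): A returns False, B returns False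
import Mathlib
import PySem

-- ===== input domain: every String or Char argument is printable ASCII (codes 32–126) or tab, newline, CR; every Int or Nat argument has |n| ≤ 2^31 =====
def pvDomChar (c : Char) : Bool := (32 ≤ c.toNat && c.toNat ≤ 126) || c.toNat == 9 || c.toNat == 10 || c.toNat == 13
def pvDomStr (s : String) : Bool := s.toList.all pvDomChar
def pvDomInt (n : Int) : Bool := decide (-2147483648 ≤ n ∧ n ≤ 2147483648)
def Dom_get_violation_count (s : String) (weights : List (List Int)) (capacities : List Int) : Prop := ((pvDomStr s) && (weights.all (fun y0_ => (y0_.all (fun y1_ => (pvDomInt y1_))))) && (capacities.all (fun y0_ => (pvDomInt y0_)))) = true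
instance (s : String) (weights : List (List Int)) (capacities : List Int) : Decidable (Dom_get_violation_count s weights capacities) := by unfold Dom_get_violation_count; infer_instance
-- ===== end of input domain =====

-- B replaces A's knapsack-major dot-product recomputation by one item-major accumulation pass
-- over the string into a per-knapsack partial-sum list, then one comparison pass (objective: alternative).

-- ===== PORT A =====
-- int(value) for a one-character string; Pre_ keeps s all-digits, where ofChars? is some
def pvIntOfChar (c : Char) : Int := (PySem.Int.ofChars? [c]).getD 0

-- __get_str_attribute: result += int(value) * attribute[index]  (attribute[index] raises when
-- out of range: Pre_ keeps every row at least len(s) long, so the pyGetD default is never used)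
def get_str_attribute (s : String) (attr0 : List Int) : Int :=
  (PySem.List.enumerate s.toList).foldl
    (fun result p => result + pvIntOfChar p.2 * PySem.List.pyGetD attr0 p.1 0) 0

def get_str_weight (s : String) (weights : List Int) : Int :=
  get_str_attribute s weights

def get_violation_count (s : String) (weights : List (List Int)) (capacities : List Int) : Int :=
  if PySem.Str.len s < 1 then 0   -- Python returns False, i.e. int 0
  else
    (PySem.List.pyRange 0 (weights.length : Int) 1).foldl
      (fun count_violations j =>
        let weight := get_str_weight s (PySem.List.pyGetD weights j [])
        if weight > PySem.List.pyGetD capacities j 0 then count_violations + 1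
        else count_violations)
      0

-- ===== PORT B =====
def get_violation_count_alt (s : String) (weights : List (List Int)) (capacities : List Int) : Int :=
  if PySem.Str.len s < 1 then 0   -- Python returns False, i.e. int 0
  else if weights.isEmpty then 0  -- no knapsacks, nothing to violate (and nothing to accumulate)
  else
    let totals :=
      (PySem.List.enumerate s.toList).foldl
        (fun totals p =>
          let v := pvIntOfChar p.2
          if v ≠ 0 then
            -- totals = [t + v * row[index] for t, row in zip(totals, weights)]
            List.zipWith (fun t row => t + v * PySem.List.pyGetD row p.1 0) totals weights
          else totals)
        (List.replicate weights.length 0)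
    (List.zip totals capacities).foldl
      (fun acc tc => if tc.1 > tc.2 then acc + 1 else acc) 0

-- ===== PRECONDITION & SPEC =====
-- Pre_ excludes the empty string, where A returns the bool False instead of an int, and
-- exactly the inputs where Python A raises: with weights nonempty, a non-digit character in s
-- (int(c) ValueError), a row shorter than s, or capacities shorter than weights (IndexError).
def Pre_get_violation_count (s : String) (weights : List (List Int)) (capacities : List Int) : Prop :=
  s.toList ≠ [] ∧
    (weights = [] ∨
      (s.toList.all PySem.Str.isdigit = true ∧ (∀ row ∈ weights, s.toList.length ≤ row.length) ∧
        weights.length ≤ capacities.length))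
instance (s : String) (weights : List (List Int)) (capacities : List Int) : Decidable (Pre_get_violation_count s weights capacities) := by unfold Pre_get_violation_count; infer_instance

def pvWitness_get_violation_count : String × List (List Int) × List Int :=
  ("10", [[3, 1], [1, 1]], [2, 5])

def Spec_get_violation_count (s : String) (weights : List (List Int)) (capacities : List Int) (out : Int) : Prop := out = get_violation_count_alt s weights capacities
instance (s : String) (weights : List (List Int)) (capacities : List Int) (out : Int) : Decidable (Spec_get_violation_count s weights capacities out) := by unfold Spec_get_violation_count; infer_instance

-- ===== CLAIM (what is proved, stated in full; the proofs are below) =====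
def Claim_equal_get_violation_count : Prop := ∀ (s : String) (weights : List (List Int)) (capacities : List Int), Dom_get_violation_count s weights capacities → Pre_get_violation_count s weights capacities → Spec_get_violation_count s weights capacities (get_violation_count s weights capacities)

-- ===== LEMMAS AND PROOFS =====

-- the running partial dot product B maintains, over an arbitrary list of (index, char) pairs
def pvPartial (ps : List (Int × Char)) (row : List Int) : Int :=
  ps.foldl (fun r p => r + pvIntOfChar p.2 * PySem.List.pyGetD row p.1 0) 0

theorem pvPartial_cons (p : Int × Char) (ps : List (Int × Char)) (row : List Int) :
    pvPartial (p :: ps) row = pvIntOfChar p.2 * PySem.List.pyGetD row p.1 0 + pvPartial ps row := by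
  simp [pvPartial, List.foldl_cons, PySem.List.foldl_add]

theorem zipWith_left_id {α : Type} (ts : List Int) (ws : List α) (h : ts.length ≤ ws.length) :
    List.zipWith (fun t (_ : α) => t) ts ws = ts := by
  induction ts generalizing ws with
  | nil => simp
  | cons t ts ih =>
    cases ws with
    | nil => simp at h
    | cons w ws => simp_all

theorem zipWith_zipWith_left {α : Type} (f g : Int → α → Int) (ts : List Int) (ws : List α) :
    List.zipWith f (List.zipWith g ts ws) ws = List.zipWith (fun t r => f (g t r) r) ts ws := by
  induction ts generalizing ws with
  | nil => simp
  | cons t ts ih =>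
    cases ws with
    | nil => simp
    | cons w ws => simp [ih]

theorem zipWith_replicate_left {α : Type} (f : Int → α → Int) (c : Int) (ws : List α) :
    List.zipWith f (List.replicate ws.length c) ws = ws.map (f c) := by
  induction ws with
  | nil => simp
  | cons w ws ih => simp [List.replicate_succ, ih]

-- B's accumulation loop computes, per knapsack, the partial dot product of the processed pairs
theorem totals_eq (ws : List (List Int)) (ps : List (Int × Char)) :
    ∀ ts : List Int, ts.length = ws.length →
    ps.foldl
      (fun totals p =>
        let v := pvIntOfChar p.2
        if v ≠ 0 then
          List.zipWith (fun t row => t + v * PySem.List.pyGetD row p.1 0) totals ws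
        else totals)
      ts
    = List.zipWith (fun t row => t + pvPartial ps row) ts ws := by
  induction ps with
  | nil =>
    intro ts h
    simp only [List.foldl_nil, pvPartial, add_zero]
    exact (zipWith_left_id ts ws (le_of_eq h)).symm
  | cons p ps ih =>
    intro ts h
    by_cases hv : pvIntOfChar p.2 ≠ 0
    · simp only [List.foldl_cons, hv, if_pos, ne_eq, not_false_eq_true]
      rw [ih _ (by simp [h, List.length_zipWith])]
      rw [zipWith_zipWith_left]
      have hf : (fun (t : Int) (r : List Int) =>
          t + pvIntOfChar p.2 * PySem.List.pyGetD r p.1 0 + pvPartial ps r)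
          = fun t r => t + pvPartial (p :: ps) r := by
        funext t r
        rw [pvPartial_cons]; ring
      rw [hf]
    · rw [ne_eq, not_not] at hv
      simp only [List.foldl_cons, hv, ne_eq, not_true_eq_false, if_false]
      rw [ih _ h]
      have hf : (fun (t : Int) (r : List Int) => t + pvPartial ps r)
          = fun t r => t + pvPartial (p :: ps) r := by
        funext t r
        rw [pvPartial_cons, hv]; ring
      rw [hf]

-- A's helper is the full partial dot product
theorem get_str_attribute_eq (s : String) (row : List Int) :
    get_str_attribute s row = pvPartial (PySem.List.enumerate s.toList) row := rfl

-- ===== VERDICT (by name: the statement is the Claim_ definition above) =====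
theorem get_violation_count_spec : Claim_equal_get_violation_count := by
  intro s ws cs _ hpre
  unfold Spec_get_violation_count get_violation_count get_violation_count_alt
  obtain ⟨hs, hrest⟩ := hpre
  have hlen1 : ¬ PySem.Str.len s < 1 := by
    rw [PySem.Str.len_eq]
    have : s.toList.length ≠ 0 := by simpa using hs
    omega
  rw [if_neg hlen1, if_neg hlen1]
  by_cases hw : ws = []
  · subst hw
    rw [if_pos (by simp)]
    simp [PySem.List.pyRange_one_eq_nil]
  · rw [if_neg (by simpa using hw)]
    rcases hrest with h0 | ⟨_, _, hlen⟩
    · exact absurd h0 hw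
    rw [totals_eq ws _ _ (by simp), zipWith_replicate_left]
    show _ = List.foldl (fun acc (tc : Int × Int) => if tc.1 > tc.2 then acc + 1 else acc) 0
      ((List.map (fun row => 0 + pvPartial (PySem.List.enumerate s.toList) row) ws).zip cs)
    rw [List.zip_map_left, List.foldl_map]
    have hzlen : (ws.zip cs).length = ws.length := by
      simp [List.length_zip, Nat.min_eq_left hlen]
    have step2 := PySem.List.foldl_pyRange_zero_pyGetD (ws.zip cs) ([], 0)
      (fun acc (tc : List Int × Int) =>
        if get_str_weight s tc.1 > tc.2 then acc + 1 else acc) (0 : Int)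
    trans (List.foldl (fun acc (tc : List Int × Int) =>
        if get_str_weight s tc.1 > tc.2 then acc + 1 else acc) 0 (ws.zip cs))
    · refine Eq.trans ?_ step2
      rw [show PySem.List.len (ws.zip cs) = (ws.length : Int) by simp [PySem.List.len_eq, hzlen]]
      apply PySem.List.foldl_congr_mem
      intro acc j hj
      have hj' := (PySem.List.mem_pyRange_one).1 hj
      have h0j : (0:Int) ≤ j := hj'.1
      have h1 : j < (ws.length : Int) := hj'.2
      have h1w : j < ((ws.zip cs).length : Int) := by rw [hzlen]; exact_mod_cast h1
      have h1c : j < (cs.length : Int) := by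
        have : (ws.length : Int) ≤ (cs.length : Int) := by exact_mod_cast hlen
        omega
      show (let weight := get_str_weight s (PySem.List.pyGetD ws j []);
            if weight > PySem.List.pyGetD cs j 0 then acc + 1 else acc) = _
      rw [PySem.List.pyGetD_eq_getElem (ws.zip cs) ([], 0) h0j h1w, List.getElem_zip]
      rw [show (PySem.List.pyGetD ws j [] : List Int) = ws[j.toNat] from
            PySem.List.pyGetD_eq_getElem ws [] h0j h1,
          show (PySem.List.pyGetD cs j 0 : Int) = cs[j.toNat] from
            PySem.List.pyGetD_eq_getElem cs 0 h0j h1c]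
    · apply PySem.List.foldl_congr_mem
      intro acc tc _
      simp [get_str_weight, get_str_attribute_eq, Prod.map]
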